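-- pv_equiv track=rewrite | github.com/PrzemekWolw/BeamNGLevelImporter | BeamNGLevelImporter/manifest_import.py | _virt_norm
-- ===== SOURCE A (Python) =====
-- def _virt_norm(s: str) -> str:
--   s = (s or "").replace("\\", "/").strip()
--   s = s.lstrip("/")
--   while s.startswith("./"):
--     s = s[2:]
--   while "//" in s:
--     s = s.replace("//", "/")
--   return s
-- ===== SOURCE B (Python) =====
-- def _virt_norm(s: str) -> str:
--   # One pass over the characters with index pointers instead of repeated
--   # string replace/slice passes.
--   cs = ['/' if c == '\\' else c for c in s]
--   i, j = 0, len(cs)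
--   while i < j and cs[i].isspace():          # strip() left
--     i += 1
--   while j > i and cs[j - 1].isspace():      # strip() right
--     j -= 1
--   while i < j and cs[i] == '/':             # lstrip('/')
--     i += 1
--   while i + 1 < j and cs[i] == '.' and cs[i + 1] == '/':   # leading './' run
--     i += 2
--   out = []
--   for k in range(i, j):                     # collapse slash runs
--     c = cs[k]
--     if c == '/' and out and out[-1] == '/':
--       continue
--     out.append(c)
--   return ''.join(out)
-- ===== Notes on version B (the rewrite author's own statement) =====
-- stated objective: alternative
-- what changed: A repeatedly slices off the leading dot-slash prefix and re-runs whole-string replace passes until no double slash remains; B makes one indexed scan that advances pointers over whitespace, leading slashes and leading dot-slash pairs and then emits each remaining character once, skipping a slash that immediately follows an emitted slash.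
import Mathlib
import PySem

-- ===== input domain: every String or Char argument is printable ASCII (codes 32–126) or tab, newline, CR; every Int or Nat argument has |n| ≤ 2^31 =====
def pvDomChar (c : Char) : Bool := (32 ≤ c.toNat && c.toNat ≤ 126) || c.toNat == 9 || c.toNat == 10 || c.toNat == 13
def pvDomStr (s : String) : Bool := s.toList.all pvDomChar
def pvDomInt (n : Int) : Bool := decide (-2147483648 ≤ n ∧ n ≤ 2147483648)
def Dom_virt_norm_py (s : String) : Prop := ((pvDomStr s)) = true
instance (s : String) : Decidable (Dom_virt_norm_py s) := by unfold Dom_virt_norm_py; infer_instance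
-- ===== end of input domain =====

-- B replaces A's repeated slice/replace string passes by one indexed scan with an output accumulator (objective: alternative; return value proved equal).

-- ===== PORT A =====
-- step equation of PySem.Chars.replace.go, and termination facts for A's
-- `while "//" in s: s = s.replace("//", "/")` loop (cited by the port's decreasing_by)
theorem pvGoStep (old new : List Char) (fuel : Nat) (c : Char) (t acc : List Char) :
    PySem.Chars.replace.go old new (fuel + 1) (c :: t) acc =
      if old.isPrefixOf (c :: t) then
        PySem.Chars.replace.go old new fuel (List.drop old.length (c :: t)) (new.reverse ++ acc)
      else PySem.Chars.replace.go old new fuel t (c :: acc) := by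
  simp [PySem.Chars.replace.go]

theorem pvGoLenLe (fuel : Nat) : ∀ (l acc : List Char),
    (PySem.Chars.replace.go ['/','/'] ['/'] fuel l acc).length ≤ acc.length + l.length := by
  induction fuel with
  | zero => intro l acc; simp [PySem.Chars.replace.go]
  | succ fuel ih =>
    intro l acc
    cases l with
    | nil => simp [PySem.Chars.replace.go]
    | cons c t =>
      rw [pvGoStep]
      by_cases h : ['/','/'].isPrefixOf (c :: t) = true
      · rw [if_pos h]
        rw [show List.drop ['/','/'].length (c :: t) = t.tail from by cases t <;> simp]
        have := ih t.tail (['/'].reverse ++ acc)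
        have ht : t.tail.length ≤ t.length := by cases t <;> simp
        simp at this ⊢
        omega
      · rw [if_neg h]
        have := ih t (c :: acc)
        simp at this ⊢
        omega

theorem pvGoLenLt (fuel : Nat) : ∀ (l acc : List Char), l.length ≤ fuel → ['/','/'] <:+: l →
    (PySem.Chars.replace.go ['/','/'] ['/'] fuel l acc).length < acc.length + l.length := by
  induction fuel with
  | zero =>
    intro l acc hle hinf
    have hl : l = [] := by cases l <;> simp_all
    subst hl; simp [List.infix_nil] at hinf
  | succ fuel ih =>
    intro l acc hle hinf
    cases l with
    | nil => simp [List.infix_nil] at hinf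
    | cons c t =>
      rw [pvGoStep]
      by_cases h : ['/','/'].isPrefixOf (c :: t) = true
      · rw [if_pos h]
        have hpre : ['/','/'] <+: (c :: t) := List.isPrefixOf_iff_prefix.mp h
        have hlen2 : 2 ≤ (c :: t).length := by simpa using hpre.length_le
        rw [show List.drop ['/','/'].length (c :: t) = t.tail from by cases t <;> simp]
        have h1 := pvGoLenLe fuel t.tail (['/'].reverse ++ acc)
        rw [show (['/'].reverse ++ acc).length = acc.length + 1 from by simp] at h1
        have e2 : (c :: t).length = t.length + 1 := by simp
        have e3 : t.tail.length + 1 ≤ t.length := by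
          cases t with
          | nil => simp at hlen2
          | cons d t' => simp
        omega
      · rw [if_neg h]
        have hinf' : ['/','/'] <:+: t := by
          rcases (List.infix_cons_iff.mp hinf) with hp | hs
          · exact absurd (List.isPrefixOf_iff_prefix.mpr hp) h
          · exact hs
        have := ih t (c :: acc) (by simp at hle; omega) hinf'
        simp at this ⊢
        omega

theorem pvReplaceLenLt (l : List Char) (h : PySem.Chars.isIn ['/','/'] l = true) :
    (PySem.Chars.replace l ['/','/'] ['/']).length < l.length := by
  have hinf : ['/','/'] <:+: l := (PySem.Chars.isIn_iff_infix _ _).mp h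
  have := pvGoLenLt l.length l [] le_rfl hinf
  simpa [PySem.Chars.replace] using this

-- `while s.startswith("./"): s = s[2:]`
def virtNormDots (cs : List Char) : List Char :=
  if h : PySem.Chars.startswith cs ['.', '/'] = true then
    virtNormDots (PySem.Chars.slice cs (some 2) none)
  else cs
termination_by cs.length
decreasing_by
  have hpre : ['.', '/'] <+: cs := (PySem.Chars.startswith_iff _ _).mp h
  rcases hpre with ⟨u, hu⟩
  subst hu
  simp [PySem.Chars.slice_eq_listSlice, PySem.List.slice_from (a := 2) _ (by norm_num)]

-- `while "//" in s: s = s.replace("//", "/")`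
def virtNormCollapse (cs : List Char) : List Char :=
  if h : PySem.Chars.isIn ['/', '/'] cs = true then
    virtNormCollapse (PySem.Chars.replace cs ['/','/'] ['/'])
  else cs
termination_by cs.length
decreasing_by exact pvReplaceLenLt cs h

def virt_norm_py (s : String) : String :=
  let cs := PySem.Chars.replace s.toList ['\\'] ['/']   -- (s or "").replace("\\", "/") ; for a str, `s or ""` is s itself
  let cs := PySem.Chars.strip cs                        -- .strip()
  let cs := cs.dropWhile (fun c => c == '/')            -- .lstrip("/") : hand port, exact — the strip set is the single char '/'
  String.mk (virtNormCollapse (virtNormDots cs))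

-- ===== PORT B =====
-- `while i + 1 < j and cs[i] == '.' and cs[i+1] == '/': i += 2`
def dropDotSlashRun : List Char → List Char
  | '.' :: '/' :: t => dropDotSlashRun t
  | cs => cs

def virt_norm_py_alt (s : String) : String :=
  let cs := s.toList.map (fun c => if c == '\\' then '/' else c)
  let cs := cs.dropWhile PySem.Chars.isspace                      -- left whitespace scan
  let cs := (cs.reverse.dropWhile PySem.Chars.isspace).reverse    -- right whitespace scan
  let cs := cs.dropWhile (fun c => c == '/')                      -- leading '/' scan
  let cs := dropDotSlashRun cs
  String.mk (cs.foldl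
    (fun out c => if c == '/' && !out.isEmpty && (out.getLast? == some '/') then out else out ++ [c]) [])

-- ===== PRECONDITION & SPEC =====
def Spec_virt_norm_py (s : String) (out : String) : Prop := out = virt_norm_py_alt s
instance (s : String) (out : String) : Decidable (Spec_virt_norm_py s out) := by unfold Spec_virt_norm_py; infer_instance

-- ===== CLAIM (what is proved, stated in full; the proofs are below) =====
def Claim_equal_virt_norm_py : Prop := ∀ (s : String), Dom_virt_norm_py s → Spec_virt_norm_py s (virt_norm_py s)

-- ===== LEMMAS AND PROOFS =====

-- single-char replace is a map
theorem pvGoBackslash (fuel : Nat) : ∀ (l acc : List Char), l.length ≤ fuel →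
    PySem.Chars.replace.go ['\\'] ['/'] fuel l acc
      = acc.reverse ++ l.map (fun c => if c == '\\' then '/' else c) := by
  induction fuel with
  | zero => intro l acc hle; cases l <;> simp_all [PySem.Chars.replace.go]
  | succ fuel ih =>
    intro l acc hle
    cases l with
    | nil => simp [PySem.Chars.replace.go]
    | cons c t =>
      rw [pvGoStep]
      have hp : (['\\'].isPrefixOf (c :: t)) = (c == '\\') := by simp [List.isPrefixOf, eq_comm]
      rw [hp]
      by_cases h : c = '\\'
      · subst h
        simp only [beq_self_eq_true, if_pos]
        rw [show (List.drop ['\\'].length ('\\' :: t)) = t by simp]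
        rw [ih t (['/'].reverse ++ acc) (by simp at hle; omega)]
        simp
      · rw [if_neg (by simp [h])]
        rw [ih t (c :: acc) (by simp at hle; omega)]
        simp [h]

theorem pvReplaceBackslash (l : List Char) :
    PySem.Chars.replace l ['\\'] ['/'] = l.map (fun c => if c == '\\' then '/' else c) := by
  simpa [PySem.Chars.replace] using pvGoBackslash l.length l [] le_rfl

-- one full pass of `.replace("//", "/")`
def pvR : List Char → List Char
  | [] => []
  | [c] => [c]
  | c :: d :: t => if c = '/' ∧ d = '/' then '/' :: pvR t else c :: pvR (d :: t)

theorem pvGoEqR (fuel : Nat) : ∀ (l acc : List Char), l.length ≤ fuel →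
    PySem.Chars.replace.go ['/','/'] ['/'] fuel l acc = acc.reverse ++ pvR l := by
  induction fuel with
  | zero => intro l acc hle; cases l <;> simp_all [PySem.Chars.replace.go, pvR]
  | succ fuel ih =>
    intro l acc hle
    cases l with
    | nil => simp [PySem.Chars.replace.go, pvR]
    | cons c t =>
      rw [pvGoStep]
      cases t with
      | nil =>
        rw [if_neg (by simp [List.isPrefixOf])]
        rw [ih [] (c :: acc) (by simp)]
        simp [pvR]
      | cons d t' =>
        have hp : (['/','/'].isPrefixOf (c :: d :: t')) = ('/' == c && '/' == d) := by
          simp [List.isPrefixOf]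
        rw [hp]
        by_cases hc : c = '/' ∧ d = '/'
        · obtain ⟨rfl, rfl⟩ := hc
          simp only [beq_self_eq_true, Bool.and_self, if_pos]
          rw [show (List.drop ['/','/'].length ('/' :: '/' :: t')) = t' by simp]
          rw [ih t' (['/'].reverse ++ acc) (by simp at hle; omega)]
          simp [pvR]
        · rw [if_neg (by intro hT; simp at hT; exact hc ⟨hT.1.symm, hT.2.symm⟩)]
          rw [ih (d :: t') (c :: acc) (by simp at hle ⊢; omega)]
          rw [show pvR (c :: d :: t') = c :: pvR (d :: t') by simp [pvR, hc]]
          simp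

theorem pvReplaceEqR (l : List Char) :
    PySem.Chars.replace l ['/','/'] ['/'] = pvR l := by
  simpa [PySem.Chars.replace] using pvGoEqR l.length l [] le_rfl

-- squeeze runs of '/' ; the Bool says whether the last emitted char was '/'
def pvSq : Bool → List Char → List Char
  | _, [] => []
  | b, c :: t => if c = '/' then (if b then pvSq true t else '/' :: pvSq true t) else c :: pvSq false t

theorem pvSqR (l : List Char) : ∀ b, pvSq b (pvR l) = pvSq b l := by
  induction l using pvR.induct with
  | case1 => intro b; simp [pvR]
  | case2 c => intro b; simp [pvR]
  | case3 c d t hcd ih =>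
    obtain ⟨rfl, rfl⟩ := hcd
    intro b
    rw [show pvR ('/' :: '/' :: t) = '/' :: pvR t by simp [pvR]]
    cases b <;> simp [pvSq, ih]
  | case4 c d t hcd ih =>
    intro b
    rw [show pvR (c :: d :: t) = c :: pvR (d :: t) by simp [pvR, hcd]]
    by_cases hc : c = '/'
    · subst hc
      cases b <;> simp [pvSq, ih]
    · simp [pvSq, hc, ih]

theorem pvSqNoDS (l : List Char) : ∀ b, ¬ (['/','/'] <:+: l) → (b = true → l.head? ≠ some '/') →
    pvSq b l = l := by
  induction l with
  | nil => intro b _ _; simp [pvSq]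
  | cons c t ih =>
    intro b hinf hhead
    have hinf' : ¬ (['/','/'] <:+: t) := fun h => hinf (h.trans (List.suffix_cons c t).isInfix)
    by_cases hc : c = '/'
    · subst hc
      have hb : b = false := by
        cases b
        · rfl
        · exact absurd rfl (fun h => hhead h (by simp))
      subst hb
      have hth : t.head? ≠ some '/' := by
        intro hh
        cases t with
        | nil => simp at hh
        | cons d t' =>
          simp at hh
          subst hh
          exact hinf ⟨[], t', by simp⟩
      rw [show pvSq false ('/' :: t) = '/' :: pvSq true t by simp [pvSq]]
      rw [ih true hinf' (fun _ => hth)]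
    · rw [show pvSq b (c :: t) = c :: pvSq false t by simp [pvSq, hc]]
      rw [ih false hinf' (by simp)]

theorem pvCollapseEqSq (l : List Char) : virtNormCollapse l = pvSq false l := by
  induction l using virtNormCollapse.induct with
  | case1 cs h ih =>
    rw [virtNormCollapse, dif_pos h, ih, pvReplaceEqR, pvSqR]
  | case2 cs h =>
    rw [virtNormCollapse, dif_neg h]
    have hninf : ¬ (['/','/'] <:+: cs) := by
      intro hinf
      exact h ((PySem.Chars.isIn_iff_infix _ _).mpr hinf)
    exact (pvSqNoDS cs false hninf (by simp)).symm

theorem pvFoldlEqSq (l : List Char) : ∀ out : List Char,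
    l.foldl (fun out c => if c == '/' && !out.isEmpty && (out.getLast? == some '/') then out else out ++ [c]) out
      = out ++ pvSq (out.getLast? == some '/') l := by
  induction l with
  | nil => intro out; simp [pvSq]
  | cons c t ih =>
    intro out
    rw [List.foldl_cons]
    by_cases hcond : (c == '/' && !out.isEmpty && (out.getLast? == some '/')) = true
    · rw [if_pos hcond]
      have hc : c = '/' := by simp at hcond; exact hcond.1.1
      have hb : (out.getLast? == some '/') = true := by simp at hcond ⊢; exact hcond.2
      rw [ih out, hb, hc]
      rw [show pvSq true ('/' :: t) = pvSq true t by simp [pvSq]]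
    · rw [if_neg hcond]
      rw [ih (out ++ [c])]
      have hlast : ((out ++ [c]).getLast? == some '/') = (c == '/') := by
        simp [List.getLast?_append]
      rw [hlast]
      by_cases hc : c = '/'
      · subst hc
        have hb : (out.getLast? == some '/') = false := by
          cases hout : (out.getLast? == some '/')
          · rfl
          · exfalso
            apply hcond
            have : out ≠ [] := by
              intro h0; subst h0; simp at hout
            simp [hout, this]
        rw [hb]
        rw [show pvSq false ('/' :: t) = '/' :: pvSq true t by simp [pvSq]]
        simp
      · rw [show pvSq (out.getLast? == some '/') (c :: t) = c :: pvSq false t by simp [pvSq, hc]]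
        have hcf : (c == '/') = false := by simp [hc]
        rw [hcf]
        simp

theorem pvDotsEq (l : List Char) : virtNormDots l = dropDotSlashRun l := by
  induction l using virtNormDots.induct with
  | case1 cs h ih =>
    have hpre : ['.', '/'] <+: cs := (PySem.Chars.startswith_iff _ _).mp h
    rcases hpre with ⟨u, hu⟩
    subst hu
    simp only [List.cons_append, List.nil_append] at ih ⊢
    rw [virtNormDots, dif_pos (by simpa using h), ih]
    rw [show PySem.Chars.slice ('.' :: '/' :: u) (some 2) none = u by
      simp [PySem.Chars.slice_eq_listSlice, PySem.List.slice_from (a := 2) _ (by norm_num)]]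
    rw [show dropDotSlashRun ('.' :: '/' :: u) = dropDotSlashRun u by simp [dropDotSlashRun]]
  | case2 cs h =>
    rw [virtNormDots, dif_neg h]
    have : ∀ t, cs ≠ '.' :: '/' :: t := by
      intro t ht
      subst ht
      exact h (by simp [PySem.Chars.startswith, List.isPrefixOf])
    unfold dropDotSlashRun
    split
    · exact absurd rfl (this _)
    · rfl

-- ===== VERDICT (by name: the statement is the Claim_ definition above) =====
theorem virt_norm_py_spec : Claim_equal_virt_norm_py := by
  intro s _
  simp only [Spec_virt_norm_py, virt_norm_py, virt_norm_py_alt]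
  rw [pvReplaceBackslash, pvDotsEq, pvCollapseEqSq, pvFoldlEqSq]
  simp [PySem.Chars.strip, PySem.Chars.lstrip, PySem.Chars.rstrip]
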